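-- pv_equiv track=rewrite | github.com/99061142/CollectionsTwo | Dobbel Trobbel.py | get_available_space
-- ===== SOURCE A (Python) =====
-- def get_available_space(array, chosen_number):
--     array_length = len(array) # Length of the array
--
--     check_array = [True] * array_length # Starting list to check which position is free
--     change_from_index = None # Upwards of this number every position is not free anymore (if its not None)
--
--     # Loop through every value of the array
--     for index, value in enumerate(array):
--         # If the value is a number
--         if isinstance(value, int):
--             # If the value is higher than the number the user chose
--             if value >= chosen_number:
--                 change_from_index = index # Set the value to change every value upwards of the index
--                 break
--
--             check_array[index] = False # Set the index to False to show that the position is taken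
--
--     # If the chosen number was lower than one of the values in the list
--     if change_from_index != None:
--         # Change every value upwards of the 'change_from_index' number
--         for index in range(change_from_index - array_length, +1):
--             # Stop the loop when the starting value is reached
--             if index == 0:
--                 break
--             else:
--                 check_array[index] = False # Set the free position to False
--
--     return check_array # Return the list of positions the user can choose
-- ===== SOURCE B (Python) =====
-- def get_available_space(array, chosen_number):
--     result = []
--     stopped = False
--     for value in array:
--         if stopped:
--             result.append(False)
--         elif isinstance(value, int):
--             result.append(False)
--             if value >= chosen_number:
--                 stopped = True
--         else:
--             result.append(True)
--     return result
-- ===== Notes on version B (the rewrite author's own statement) =====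
-- stated objective: simpler
-- what changed: Replaces A's two passes (mark-then-break plus a negative-index fixup loop over a preallocated True list) with a single forward pass that builds the result directly, carrying one 'stopped' flag.
import Mathlib
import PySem

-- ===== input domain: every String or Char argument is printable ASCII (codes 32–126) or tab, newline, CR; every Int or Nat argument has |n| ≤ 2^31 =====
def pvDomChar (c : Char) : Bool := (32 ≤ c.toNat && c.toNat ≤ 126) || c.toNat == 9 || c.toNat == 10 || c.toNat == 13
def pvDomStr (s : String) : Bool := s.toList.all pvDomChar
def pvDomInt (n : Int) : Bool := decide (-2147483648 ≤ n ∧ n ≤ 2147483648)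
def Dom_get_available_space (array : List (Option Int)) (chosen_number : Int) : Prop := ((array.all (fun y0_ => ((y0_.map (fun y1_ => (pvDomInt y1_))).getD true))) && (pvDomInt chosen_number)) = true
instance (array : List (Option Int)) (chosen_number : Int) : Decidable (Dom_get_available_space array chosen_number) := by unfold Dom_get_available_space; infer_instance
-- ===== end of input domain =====

-- B merges A's two passes (mark-then-break plus a negative-index fixup loop) into one forward
-- pass carrying a 'stopped' flag; same return value, objective: simpler.

-- ===== PORT A =====
-- check_array[i] = v : in A both assignments hit an index that is always in range
-- (enumerate indices, and negative indices in [change_from_index - L, -1]), so this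
-- total rendering of Python list assignment is exact on every index A uses.
def pySetA (xs : List Bool) (i : Int) (v : Bool) : List Bool :=
  if i < 0 then xs.set (i + xs.length).toNat v else xs.set i.toNat v

-- A's first for-loop: enumerate, break on value >= chosen_number, else mark the index False
def gasLoop1 (chosen : Int) : List (Int × Option Int) → List Bool → Option Int × List Bool
  | [], ca => (none, ca)
  | (index, value) :: rest, ca =>
    match value with
    | some v => if v ≥ chosen then (some index, ca)
                else gasLoop1 chosen rest (pySetA ca index false)
    | none => gasLoop1 chosen rest ca

-- A's second for-loop: for index in range(change_from_index - array_length, +1), break at 0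
def gasLoop2 : List Int → List Bool → List Bool
  | [], ca => ca
  | i :: rest, ca => if i = 0 then ca else gasLoop2 rest (pySetA ca i false)

def get_available_space (array : List (Option Int)) (chosen_number : Int) : List Bool :=
  let array_length : Int := array.length
  let check_array := List.replicate array.length true
  match gasLoop1 chosen_number (PySem.List.enumerate array 0) check_array with
  | (none, ca) => ca
  | (some ci, ca) => gasLoop2 (PySem.List.pyRange (ci - array_length) 1 1) ca

-- ===== PORT B =====
def gasAltLoop (chosen : Int) : List (Option Int) → Bool → List Bool
  | [], _ => []
  | value :: rest, stopped =>
    if stopped then false :: gasAltLoop chosen rest true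
    else match value with
      | some v => false :: gasAltLoop chosen rest (decide (v ≥ chosen))
      | none => true :: gasAltLoop chosen rest false

def get_available_space_alt (array : List (Option Int)) (chosen_number : Int) : List Bool :=
  gasAltLoop chosen_number array false

-- ===== PRECONDITION & SPEC =====
def Spec_get_available_space (array : List (Option Int)) (chosen_number : Int) (out : List Bool) : Prop := out = get_available_space_alt array chosen_number
instance (array : List (Option Int)) (chosen_number : Int) (out : List Bool) : Decidable (Spec_get_available_space array chosen_number out) := by unfold Spec_get_available_space; infer_instance

-- ===== CLAIM (what is proved, stated in full; the proofs are below) =====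
def Claim_equal_get_available_space : Prop := ∀ (array : List (Option Int)) (chosen_number : Int), Dom_get_available_space array chosen_number → Spec_get_available_space array chosen_number (get_available_space array chosen_number)

-- ===== LEMMAS AND PROOFS =====

-- index of the first element that is an int ≥ chosen (A's change_from_index, if any)
def fstop : List (Option Int) → Int → Option Nat
  | [], _ => none
  | some v :: xs, c => if v ≥ c then some 0 else (fstop xs c).map (· + 1)
  | none :: xs, c => (fstop xs c).map (· + 1)

lemma fstop_lt (xs : List (Option Int)) (c : Int) (j : Nat) (h : fstop xs c = some j) :
    j < xs.length := by
  induction xs generalizing j with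
  | nil => simp [fstop] at h
  | cons x xs ih =>
    match x with
    | some v =>
      simp only [fstop] at h
      split at h
      · simp_all
        omega
      · rcases Option.map_eq_some_iff.mp h with ⟨j', hj', rfl⟩
        have := ih j' hj'; simp; omega
    | none =>
      simp only [fstop] at h
      rcases Option.map_eq_some_iff.mp h with ⟨j', hj', rfl⟩
      have := ih j' hj'; simp; omega

lemma loop1_char (chosen : Int) (xs : List (Option Int)) :
    ∀ (pre : List Bool),
    gasLoop1 chosen (PySem.List.enumerate xs (pre.length : Int)) (pre ++ List.replicate xs.length true) =
    (match fstop xs chosen with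
    | none => (none, pre ++ xs.map Option.isNone)
    | some j => (some ((pre.length + j : Nat) : Int),
        pre ++ (xs.take j).map Option.isNone ++ List.replicate (xs.length - j) true)) := by
  induction xs with
  | nil => intro pre; simp [PySem.List.enumerate, gasLoop1, fstop]
  | cons x xs ih =>
    intro pre
    rw [PySem.List.enumerate_cons]
    match x with
    | some v =>
      by_cases hv : v ≥ chosen
      · simp [gasLoop1, fstop, hv]
      · have hset : pySetA (pre ++ List.replicate (some v :: xs).length true) (pre.length : Int) false
            = (pre ++ [false]) ++ List.replicate xs.length true := by
          simp [pySetA, List.set_append_right pre.length false le_rfl,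
            List.replicate_succ, List.append_assoc]
        have hlen : ((pre.length : Int) + 1) = (((pre ++ [false]).length : Nat) : Int) := by
          simp
        simp only [gasLoop1]
        rw [if_neg hv, hset, hlen, ih (pre ++ [false])]
        simp only [fstop, if_neg hv]
        cases hf : fstop xs chosen with
        | none => simp
        | some j =>
          simp only [Option.map_some, Prod.mk.injEq]
          refine ⟨?_, ?_⟩
          · congr 1; simp only [List.length_append, List.length_cons, List.length_nil]; omega
          · rw [List.take_succ_cons]
            simp [Nat.succ_sub_succ, List.append_assoc]
    | none =>
      have hca : pre ++ List.replicate (none :: xs).length true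
          = (pre ++ [true]) ++ List.replicate xs.length true := by
        simp [List.replicate_succ, List.append_assoc]
      have hlen : ((pre.length : Int) + 1) = (((pre ++ [true]).length : Nat) : Int) := by
        simp
      simp only [gasLoop1]
      rw [hca, hlen, ih (pre ++ [true])]
      simp only [fstop]
      cases hf : fstop xs chosen with
      | none => simp
      | some j =>
        simp only [Option.map_some, Prod.mk.injEq]
        refine ⟨?_, ?_⟩
        · congr 1; simp only [List.length_append, List.length_cons, List.length_nil]; omega
        · rw [List.take_succ_cons]
          simp [Nat.succ_sub_succ, List.append_assoc]

lemma loop2_char : ∀ (d : Nat) (ca : List Bool), d ≤ ca.length →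
    gasLoop2 (PySem.List.pyRange (-(d : Int)) 1 1) ca
      = ca.take (ca.length - d) ++ List.replicate d false := by
  intro d
  induction d with
  | zero =>
    intro ca _
    rw [show (-(0:Nat) : Int) = 0 by simp,
      PySem.List.pyRange_one_cons (by norm_num),
      PySem.List.pyRange_one_eq_nil (by norm_num)]
    simp [gasLoop2]
  | succ d ih =>
    intro ca hd
    rw [PySem.List.pyRange_one_cons (by push_cast; omega)]
    have h0 : (-(((d:Nat)+1 : Nat) : Int)) ≠ 0 := by push_cast; omega
    have hstep : (-(((d:Nat)+1 : Nat) : Int)) + 1 = -(d : Int) := by push_cast; omega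
    simp only [gasLoop2, if_neg h0, hstep]
    have hp : ((-(((d:Nat)+1 : Nat) : Int)) + ca.length).toNat = ca.length - (d+1) := by
      push_cast; omega
    have hneg : (-(((d:Nat)+1 : Nat) : Int)) < 0 := by push_cast; omega
    simp only [pySetA, if_pos hneg, hp]
    set p := ca.length - (d + 1) with hpdef
    have hplt : p < ca.length := by omega
    rw [ih (ca.set p false) (by simp; omega)]
    have hA : (ca.take p).length = p := by simp; omega
    have hfinal : (ca.set p false).take ((ca.set p false).length - d) = ca.take p ++ [false] := by
      rw [List.set_eq_take_cons_drop false hplt]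
      rw [show ca.take p ++ false :: ca.drop (p + 1) = (ca.take p ++ [false]) ++ ca.drop (p + 1) by
        simp [List.append_assoc]]
      rw [show ((ca.take p ++ [false]) ++ ca.drop (p + 1)).length - d = p + 1 by simp; omega]
      rw [List.take_append_of_le_length (by simp [hA])]
      exact List.take_of_length_le (by simp [hA])
    rw [hfinal, List.append_assoc]
    simp [List.replicate_succ]

lemma alt_stopped (chosen : Int) (xs : List (Option Int)) :
    gasAltLoop chosen xs true = List.replicate xs.length false := by
  induction xs with
  | nil => simp [gasAltLoop]
  | cons x xs ih => simp [gasAltLoop, ih, List.replicate_succ]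

lemma alt_char (chosen : Int) (xs : List (Option Int)) :
    gasAltLoop chosen xs false =
    (match fstop xs chosen with
    | none => xs.map Option.isNone
    | some j => (xs.take j).map Option.isNone ++ List.replicate (xs.length - j) false) := by
  induction xs with
  | nil => simp [gasAltLoop, fstop]
  | cons x xs ih =>
    match x with
    | some v =>
      by_cases hv : v ≥ chosen
      · simp [gasAltLoop, fstop, hv, alt_stopped, List.replicate_succ]
      · rw [show gasAltLoop chosen (some v :: xs) false
            = false :: gasAltLoop chosen xs (decide (v ≥ chosen)) from rfl]
        rw [decide_eq_false hv, ih]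
        simp only [fstop, if_neg hv]
        cases hf : fstop xs chosen with
        | none => simp
        | some j => simp [List.take_succ_cons, Nat.succ_sub_succ]
    | none =>
      rw [show gasAltLoop chosen (none :: xs) false = true :: gasAltLoop chosen xs false from rfl]
      rw [ih]
      simp only [fstop]
      cases hf : fstop xs chosen with
      | none => simp
      | some j => simp [List.take_succ_cons, Nat.succ_sub_succ]

-- ===== VERDICT (by name: the statement is the Claim_ definition above) =====
theorem get_available_space_spec : Claim_equal_get_available_space := by
  intro array chosen _
  unfold Spec_get_available_space get_available_space get_available_space_alt
  have h1 := loop1_char chosen array []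
  simp only [List.length_nil, Nat.cast_zero, List.nil_append, Nat.zero_add] at h1
  rw [alt_char]
  cases hf : fstop array chosen with
  | none =>
    rw [hf] at h1
    simp only [h1]
  | some j =>
    rw [hf] at h1
    simp only [h1]
    have hj : j < array.length := fstop_lt array chosen j hf
    have hrange : ((j : Nat) : Int) - (array.length : Int)
        = -(((array.length - j : Nat) : Nat) : Int) := by omega
    rw [hrange]
    have hcalen : ((array.take j).map Option.isNone ++ List.replicate (array.length - j) true).length
        = array.length := by simp; omega
    rw [loop2_char (array.length - j) _ (by rw [hcalen]; omega)]
    rw [hcalen, show array.length - (array.length - j) = j by omega]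
    rw [List.take_append_of_le_length (by simp; omega)]
    rw [List.take_of_length_le (by simp)]
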